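-- pv_equiv track=rewrite | github.com/brmeena/python-utilities | utils/englishcommon.py | get_normalized_matching_score
-- ===== SOURCE A (Python) =====
-- def expand_contractions(sent):
--     c_l=["can't","n't","'ve","'d","'re","'m","it's","cannot","he's","she's","which's","who's"]
--     f_l=["can not"," not"," have"," had"," are"," am","it is","can not","he is","she is","which is","who is"]
--     index=0
--     for cli in c_l:
--         sent=sent.replace(cli,f_l[index])
--         index=index+1
--     return sent
--
-- def get_normalized_matching_score(sent1,sent2):
--     sent1=sent1.lower()
--     sent2=sent2.lower()
--     sent1=expand_contractions(sent1)
--     sent2=expand_contractions(sent2)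
--     whitelist = set('abcdefghijklmnopqrstuvwxyz ABCDEFGHIJKLMNOPQRSTUVWXYZ')
--     sent1=''.join(filter(whitelist.__contains__, sent1))
--     sent2=''.join(filter(whitelist.__contains__, sent2))
--     w_l1=sent1.split(" ")
--     w_l2=sent2.split(" ")
--     total_count=len(w_l1)+len(w_l2)
--     if total_count==0:
--         return 0
--     match_count=0
--     for w1 in w_l1:
--         if w1 in w_l2:
--             match_count=match_count+1
--     match_score=int((match_count*200)/total_count)
--     return match_score
-- ===== SOURCE B (Python) =====
-- def expand_contractions(sent):
--     c_l=["can't","n't","'ve","'d","'re","'m","it's","cannot","he's","she's","which's","who's"]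
--     f_l=["can not"," not"," have"," had"," are"," am","it is","can not","he is","she is","which is","who is"]
--     for c, f in zip(c_l, f_l):
--         sent = sent.replace(c, f)
--     return sent
--
-- def _words(sent):
--     sent = expand_contractions(sent.lower())
--     whitelist = set('abcdefghijklmnopqrstuvwxyz ABCDEFGHIJKLMNOPQRSTUVWXYZ')
--     return ''.join(ch for ch in sent if ch in whitelist).split(" ")
--
-- def get_normalized_matching_score(sent1, sent2):
--     w_l1 = _words(sent1)
--     w_l2 = _words(sent2)
--     total_count = len(w_l1) + len(w_l2)
--     if total_count == 0:
--         return 0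
--     a = sorted(w_l1)
--     b = sorted(set(w_l2))
--     i = j = match_count = 0
--     while i < len(a) and j < len(b):
--         if a[i] < b[j]:
--             i += 1
--         elif b[j] < a[i]:
--             j += 1
--         else:
--             match_count += 1
--             i += 1
--     return int((match_count * 200) / total_count)
-- ===== Notes on version B (the rewrite author's own statement) =====
-- stated objective: alternative
-- what changed: A counts matches by scanning the whole second word list once per word of the first sentence; B sorts the first sentence's words and the deduplicated second list and counts matches in a single two-pointer merge scan over the two sorted lists.
import Mathlib
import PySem

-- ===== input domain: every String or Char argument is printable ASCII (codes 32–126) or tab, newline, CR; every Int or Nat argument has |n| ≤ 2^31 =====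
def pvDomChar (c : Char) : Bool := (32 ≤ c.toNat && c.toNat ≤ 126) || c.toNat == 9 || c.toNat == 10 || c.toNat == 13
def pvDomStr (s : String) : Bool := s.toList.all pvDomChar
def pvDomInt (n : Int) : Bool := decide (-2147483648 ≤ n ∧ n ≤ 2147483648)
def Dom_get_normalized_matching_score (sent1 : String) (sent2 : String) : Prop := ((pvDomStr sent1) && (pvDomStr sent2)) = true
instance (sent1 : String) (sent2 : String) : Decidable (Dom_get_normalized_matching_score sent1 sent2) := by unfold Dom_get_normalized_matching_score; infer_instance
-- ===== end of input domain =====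

-- B replaces A's nested membership scan by sorting both word lists (the second deduplicated) and
-- counting matches in a single two-pointer merge scan (objective: alternative); normalization unchanged.

-- ===== PORT A =====
-- literal data of expand_contractions (both Pythons define the same two lists)
def pvCl : List (List Char) := ["can't".toList, "n't".toList, "'ve".toList, "'d".toList, "'re".toList, "'m".toList, "it's".toList, "cannot".toList, "he's".toList, "she's".toList, "which's".toList, "who's".toList]
def pvFl : List (List Char) := ["can not".toList, " not".toList, " have".toList, " had".toList, " are".toList, " am".toList, "it is".toList, "can not".toList, "he is".toList, "she is".toList, "which is".toList, "who is".toList]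
def pvWhitelist : PySem.Set Char := PySem.Set.ofList "abcdefghijklmnopqrstuvwxyz ABCDEFGHIJKLMNOPQRSTUVWXYZ".toList

-- A's expand_contractions: a loop over c_l keeping an explicit index into f_l
-- (f_l[index] is always in range — the two literal lists have equal length — so pyGetD is exact here)
def pvExpandA (sent : List Char) : List Char :=
  (pvCl.foldl (fun (st : List Char × Int) cli =>
      (PySem.Chars.replace st.1 cli (PySem.List.pyGetD pvFl st.2 []), st.2 + 1)) (sent, (0 : Int))).1

-- int((match_count*200)/total_count): float division then int(); exact as truncdiv at these magnitudes
def get_normalized_matching_score (sent1 : String) (sent2 : String) : Int :=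
  let s1 := pvExpandA (PySem.Chars.lower sent1.toList)
  let s2 := pvExpandA (PySem.Chars.lower sent2.toList)
  let s1 := s1.filter (fun c => PySem.Set.contains pvWhitelist c)
  let s2 := s2.filter (fun c => PySem.Set.contains pvWhitelist c)
  let wl1 := PySem.Chars.splitOn s1 [' ']
  let wl2 := PySem.Chars.splitOn s2 [' ']
  let total : Int := (wl1.length : Int) + (wl2.length : Int)
  if total == 0 then 0
  else
    let mc := wl1.foldl (fun acc w1 => if wl2.contains w1 then acc + 1 else acc) (0 : Int)
    PySem.Int.truncdiv (mc * 200) total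

-- ===== PORT B =====
-- B's expand_contractions: one pass over zip(c_l, f_l)
def pvExpandB (sent : List Char) : List Char :=
  (pvCl.zip pvFl).foldl (fun s p => PySem.Chars.replace s p.1 p.2) sent

-- B's _words helper: lower -> expand -> whitelist filter -> split(" ")
def pvWordsB (sent : String) : List (List Char) :=
  PySem.Chars.splitOn ((pvExpandB (PySem.Chars.lower sent.toList)).filter (fun c => PySem.Set.contains pvWhitelist c)) [' ']

-- B's two-pointer while loop: the merge scan over the two sorted lists, consuming them from the front
def pvMergeCount : List (List Char) → List (List Char) → Int
  | [], _ => 0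
  | _ :: _, [] => 0
  | x :: xs, y :: ys =>
    if x < y then pvMergeCount xs (y :: ys)
    else if y < x then pvMergeCount (x :: xs) ys
    else 1 + pvMergeCount xs (y :: ys)
termination_by a b => a.length + b.length

def get_normalized_matching_score_alt (sent1 : String) (sent2 : String) : Int :=
  let w1 := pvWordsB sent1
  let w2 := pvWordsB sent2
  let total : Int := (w1.length : Int) + (w2.length : Int)
  if total == 0 then 0
  else
    let a := PySem.List.sorted w1 (fun x => x) false
    let b := PySem.List.sorted (PySem.Set.ofList w2) (fun x => x) false
    PySem.Int.truncdiv (pvMergeCount a b * 200) total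

-- ===== PRECONDITION & SPEC =====
def Spec_get_normalized_matching_score (sent1 : String) (sent2 : String) (out : Int) : Prop := out = get_normalized_matching_score_alt sent1 sent2
instance (sent1 : String) (sent2 : String) (out : Int) : Decidable (Spec_get_normalized_matching_score sent1 sent2 out) := by unfold Spec_get_normalized_matching_score; infer_instance

-- ===== CLAIM (what is proved, stated in full; the proofs are below) =====
def Claim_equal_get_normalized_matching_score : Prop := ∀ (sent1 : String) (sent2 : String), Dom_get_normalized_matching_score sent1 sent2 → Spec_get_normalized_matching_score sent1 sent2 (get_normalized_matching_score sent1 sent2)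

-- ===== LEMMAS AND PROOFS =====
-- a fold with an explicit running index into fl is the fold over zip
lemma pvFold_idx_eq_zip (fl : List (List Char)) :
    ∀ (cl rest : List (List Char)) (s : List Char) (k : Nat),
    fl.drop k = rest → cl.length ≤ rest.length →
    (cl.foldl (fun (st : List Char × Int) cli =>
        (PySem.Chars.replace st.1 cli (PySem.List.pyGetD fl st.2 []), st.2 + 1)) (s, (k : Int))).1
      = (cl.zip rest).foldl (fun s p => PySem.Chars.replace s p.1 p.2) s := by
  intro cl
  induction cl with
  | nil => intro rest s k _ _; simp [List.foldl]
  | cons c cl ih =>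
    intro rest s k hdrop hlen
    cases rest with
    | nil => simp at hlen
    | cons r rest' =>
      have hget : PySem.List.pyGetD fl (k : Int) [] = r := by
        rw [PySem.List.pyGetD_natCast]
        have : fl[k]? = some r := by
          have h0 : (fl.drop k)[0]? = fl[k + 0]? := List.getElem?_drop
          rw [hdrop] at h0
          simpa using h0.symm
        simp [List.getD, this]
      have hdrop' : fl.drop (k + 1) = rest' := by
        have : fl.drop (k + 1) = (fl.drop k).drop 1 := by rw [List.drop_drop]
        rw [this, hdrop]; simp
      have hlen' : cl.length ≤ rest'.length := by simp at hlen; omega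
      simp only [List.foldl, List.zip, List.zipWith, hget]
      have hcast : (k : Int) + 1 = ((k + 1 : Nat) : Int) := by push_cast; ring
      rw [hcast]
      exact ih rest' (PySem.Chars.replace s c r) (k + 1) hdrop' hlen'

lemma pvExpand_eq (s : List Char) : pvExpandA s = pvExpandB s :=
  pvFold_idx_eq_zip pvFl pvCl pvFl s 0 rfl (by decide)

-- the merge scan over a weakly sorted left list and a strictly sorted right list counts the
-- left occurrences whose word occurs in the right list
lemma pvMergeCount_eq_countP :
    ∀ (a b : List (List Char)), a.Pairwise (· ≤ ·) → b.Pairwise (· < ·) →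
    pvMergeCount a b = (a.countP (fun x => b.contains x) : Int)
  | [], b, _, _ => by simp [pvMergeCount]
  | x :: xs, [], _, _ => by
    rw [pvMergeCount]
    have : (x :: xs).countP (fun z => ([] : List (List Char)).contains z) = 0 := by
      simp
    rw [this]; rfl
  | x :: xs, y :: ys, ha, hb => by
    have hxs : xs.Pairwise (· ≤ ·) := ha.tail
    have hys : ys.Pairwise (· < ·) := hb.tail
    by_cases h1 : x < y
    · have hnot : (y :: ys).contains x = false := by
        rw [← Bool.not_eq_true, List.contains_iff_mem]
        intro hm
        rw [List.mem_cons] at hm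
        rcases hm with rfl | hm
        · exact absurd h1 (lt_irrefl x)
        · exact absurd (lt_trans h1 (List.rel_of_pairwise_cons hb hm)) (lt_irrefl x)
      rw [pvMergeCount, if_pos h1, pvMergeCount_eq_countP xs (y :: ys) hxs hb,
          List.countP_cons, hnot]
      simp
    · by_cases h2 : y < x
      · have hcount : (x :: xs).countP (fun z => (y :: ys).contains z)
            = (x :: xs).countP (fun z => ys.contains z) := by
          apply List.countP_congr
          intro z hz
          have hxz : x ≤ z := by
            rcases hz with _ | hz
            · exact le_refl _
            · exact List.rel_of_pairwise_cons ha (by assumption)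
          have hne : z ≠ y := by
            intro h; rw [h] at hxz; exact absurd (lt_of_lt_of_le h2 hxz) (lt_irrefl y)
          simp [hne]
        rw [pvMergeCount, if_neg h1, if_pos h2, pvMergeCount_eq_countP (x :: xs) ys ha hys, hcount]
      · have hxy : x = y := le_antisymm (not_lt.1 h2) (not_lt.1 h1)
        have hmem : (y :: ys).contains x = true := by simp [hxy]
        rw [pvMergeCount, if_neg h1, if_neg h2, pvMergeCount_eq_countP xs (y :: ys) hxs hb,
            List.countP_cons, hmem]
        simp only [if_true]
        push_cast
        omega
termination_by a b => a.length + b.length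

-- A's occurrence loop as a countP
lemma pvFoldCount (w2 : List (List Char)) : ∀ (w1 : List (List Char)) (init : Int),
    w1.foldl (fun acc w => if w2.contains w then acc + 1 else acc) init
      = init + (w1.countP (fun x => w2.contains x) : Int) := by
  intro w1
  induction w1 with
  | nil => intro init; simp [List.countP]
  | cons x xs ih =>
    intro init
    by_cases h : w2.contains x
    · simp only [List.foldl, h, if_pos, ih, List.countP_cons]
      push_cast; simp; ring
    · simp only [List.foldl, h, ih, List.countP_cons, Bool.false_eq_true, if_false]
      simp

-- B's merge count = A's occurrence count
lemma pvMatch_eq (w1 w2 : List (List Char)) :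
    pvMergeCount (PySem.List.sorted w1 (fun x => x) false)
        (PySem.List.sorted (PySem.Set.ofList w2) (fun x => x) false)
      = w1.foldl (fun acc w => if w2.contains w then acc + 1 else acc) (0 : Int) := by
  have ha : (PySem.List.sorted w1 (fun x => x) false).Pairwise (· ≤ ·) := by
    have h := PySem.List.sorted_pairwise (xs := w1) (key := fun (x : List Char) => x)
    convert h using 2
  have hb : (PySem.List.sorted (PySem.Set.ofList w2) (fun x => x) false).Pairwise (· < ·) := by
    have h := PySem.List.sorted_ofList_pairwise_lt (xs := w2)
    convert h using 2
  rw [pvFoldCount, zero_add, pvMergeCount_eq_countP _ _ ha hb]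
  congr 1
  rw [(PySem.List.sorted_perm w1 (fun x => x) false).countP_eq]
  apply List.countP_congr
  intro z _
  have hz : z ∈ PySem.List.sorted (PySem.Set.ofList w2) (fun x => x) false ↔ z ∈ w2 := by
    rw [PySem.List.mem_sorted, PySem.Set.mem_ofList]
  by_cases hm : z ∈ w2 <;> simp [hz, hm]

-- ===== VERDICT (by name: the statement is the Claim_ definition above) =====
theorem get_normalized_matching_score_spec : Claim_equal_get_normalized_matching_score := by
  intro sent1 sent2 _hdom
  unfold Spec_get_normalized_matching_score
  simp only [get_normalized_matching_score, get_normalized_matching_score_alt, pvWordsB,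
    pvExpand_eq, pvMatch_eq]
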